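-- pv_equiv track=rewrite | github.com/giovanniboscu/continuous-section-field | src/csf/utils/csf_sp.py | strip_wall_cell_suffix
-- ===== SOURCE A (Python) =====
-- TOKEN_CELL = "@cell"
--
-- TOKEN_CLOSED = "@closed"
--
-- TOKEN_WALL = "@wall"
--
-- def strip_wall_cell_suffix(name: str) -> str:
--     """
--     Remove the first occurrence of '@cell', '@wall', or '@closed'
--     and everything after it.
--     """
--     if not name:
--         return name
--
--     low = name.lower()
--     idxs = [
--         i
--         for i in (
--             low.find(TOKEN_CELL),
--             low.find(TOKEN_WALL),
--             low.find(TOKEN_CLOSED),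
--         )
--         if i >= 0
--     ]
--     if not idxs:
--         return name
--
--     return name[: min(idxs)]
-- ===== SOURCE B (Python) =====
-- def strip_wall_cell_suffix(name: str) -> str:
--     """
--     Remove the first occurrence of '@cell', '@wall', or '@closed'
--     and everything after it.
--     """
--     low = name.lower()
--     for i, ch in enumerate(low):
--         if ch == '@':
--             rest = low[i:]
--             if (rest.startswith("@cell")
--                     or rest.startswith("@wall")
--                     or rest.startswith("@closed")):
--                 return name[:i]
--     return name
-- ===== Notes on version B (the rewrite author's own statement) =====
-- stated objective: alternative
-- what changed: Replaces the three independent full-string find() calls and the min over their results with a single left-to-right scan that stops at the first position where any of the three tokens starts.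
import Mathlib
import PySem

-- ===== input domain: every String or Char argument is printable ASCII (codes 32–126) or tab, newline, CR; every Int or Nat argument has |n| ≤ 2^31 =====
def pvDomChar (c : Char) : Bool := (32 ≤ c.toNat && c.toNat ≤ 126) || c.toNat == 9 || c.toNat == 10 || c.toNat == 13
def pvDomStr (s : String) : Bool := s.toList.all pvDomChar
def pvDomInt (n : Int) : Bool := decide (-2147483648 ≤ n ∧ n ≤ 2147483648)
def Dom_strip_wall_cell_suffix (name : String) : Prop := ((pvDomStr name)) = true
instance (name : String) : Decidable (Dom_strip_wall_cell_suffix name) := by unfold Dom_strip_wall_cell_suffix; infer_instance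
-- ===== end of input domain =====

-- B replaces A's three independent full-string find() calls plus min() with one
-- left-to-right scan stopping at the earliest position where any token starts (alternative, not measured faster).

-- ===== PORT A =====
def cellTok : List Char := ['@', 'c', 'e', 'l', 'l']
def wallTok : List Char := ['@', 'w', 'a', 'l', 'l']
def closedTok : List Char := ['@', 'c', 'l', 'o', 's', 'e', 'd']

def strip_wall_cell_suffix (name : String) : String :=
  if name.toList = [] then name
  else
    let low := PySem.Chars.lower name.toList
    let idxs := [PySem.Chars.find low cellTok, PySem.Chars.find low wallTok,
                 PySem.Chars.find low closedTok].filter (fun i => decide (0 ≤ i))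
    match PySem.List.min? idxs id with
    | none => name
    | some m => String.ofList (PySem.List.slice name.toList none (some m))

-- ===== PORT B =====
def tokAt (s : List Char) : Bool :=
  PySem.Chars.startswith s cellTok || PySem.Chars.startswith s wallTok ||
    PySem.Chars.startswith s closedTok

def findTok : List Char → Option Nat
  | [] => none
  | c :: rest =>
      if (c == '@') && tokAt (c :: rest) then some 0
      else (findTok rest).map (· + 1)

def strip_wall_cell_suffix_alt (name : String) : String :=
  match findTok (PySem.Chars.lower name.toList) with
  | none => name
  | some i => String.ofList (PySem.List.slice name.toList none (some (i : Int)))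

-- ===== PRECONDITION & SPEC =====
def Spec_strip_wall_cell_suffix (name : String) (out : String) : Prop := out = strip_wall_cell_suffix_alt name
instance (name : String) (out : String) : Decidable (Spec_strip_wall_cell_suffix name out) := by unfold Spec_strip_wall_cell_suffix; infer_instance

-- ===== CLAIM (what is proved, stated in full; the proofs are below) =====
def Claim_equal_strip_wall_cell_suffix : Prop := ∀ (name : String), Dom_strip_wall_cell_suffix name → Spec_strip_wall_cell_suffix name (strip_wall_cell_suffix name)

-- ===== LEMMAS AND PROOFS =====

theorem tokAt_iff (s : List Char) :
    tokAt s = true ↔ cellTok <+: s ∨ wallTok <+: s ∨ closedTok <+: s := by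
  simp [tokAt, PySem.Chars.startswith_iff, or_assoc]

theorem tokAt_head {c : Char} {rest : List Char} (h : tokAt (c :: rest) = true) : c = '@' := by
  rcases (tokAt_iff _).1 h with h | h | h <;>
    · simp only [cellTok, wallTok, closedTok, List.cons_prefix_cons] at h
      exact h.1.symm

theorem findTok_some_spec : ∀ (L : List Char) (i : Nat), findTok L = some i →
    tokAt (L.drop i) = true ∧ ∀ j < i, tokAt (L.drop j) = false := by
  intro L
  induction L with
  | nil => intro i h; simp [findTok] at h
  | cons c rest ih =>
      intro i h
      by_cases hg : ((c == '@') && tokAt (c :: rest)) = true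
      · simp [findTok, hg] at h
        subst h
        refine ⟨?_, fun j hj => absurd hj (by omega)⟩
        simp only [Bool.and_eq_true] at hg
        exact hg.2
      · simp [findTok, hg] at h
        obtain ⟨i', hi', rfl⟩ := h
        obtain ⟨h1, h2⟩ := ih i' hi'
        refine ⟨h1, fun j hj => ?_⟩
        cases j with
        | zero =>
            simp only [List.drop]
            by_contra hne
            have ht : tokAt (c :: rest) = true := by
              cases hx : tokAt (c :: rest) <;> simp [hx] at hne ⊢
            have hc := tokAt_head ht
            subst hc
            simp [ht] at hg
        | succ j' => exact h2 j' (by omega)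

theorem findTok_none_spec : ∀ (L : List Char), findTok L = none →
    ∀ j, tokAt (L.drop j) = false := by
  intro L
  induction L with
  | nil => intro _ j; rw [List.drop_nil]; decide
  | cons c rest ih =>
      intro h j
      by_cases hg : ((c == '@') && tokAt (c :: rest)) = true
      · simp [findTok, hg] at h
      · simp [findTok, hg] at h
        cases j with
        | zero =>
            simp only [List.drop]
            by_contra hne
            have ht : tokAt (c :: rest) = true := by
              cases hx : tokAt (c :: rest) <;> simp [hx] at hne ⊢
            have hc := tokAt_head ht
            subst hc
            simp [ht] at hg
        | succ j' => exact ih h j'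

theorem prefix_drop_find (L t : List Char) (j : Nat) (h : t <+: L.drop j) :
    0 ≤ PySem.Chars.find L t ∧ (PySem.Chars.find L t).toNat ≤ j := by
  have hinf : t <:+: L := h.isInfix.trans (List.drop_suffix j L).isInfix
  have h0 : 0 ≤ PySem.Chars.find L t := (PySem.Chars.find_nonneg_iff L t).2 hinf
  refine ⟨h0, ?_⟩
  by_contra hlt
  exact (PySem.Chars.find_spec h0).2 j (by omega) h

set_option maxHeartbeats 2000000 in
theorem ports_agree (name : String) :
    strip_wall_cell_suffix name = strip_wall_cell_suffix_alt name := by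
  set L := PySem.Chars.lower name.toList with hL
  cases hft : findTok L with
  | none =>
      have hno := findTok_none_spec L hft
      have h1 : ¬ 0 ≤ PySem.Chars.find L cellTok := by
        intro h0
        have := (tokAt_iff _).2 (Or.inl (PySem.Chars.find_spec h0).1)
        simp [hno] at this
      have h2 : ¬ 0 ≤ PySem.Chars.find L wallTok := by
        intro h0
        have := (tokAt_iff _).2 (Or.inr (Or.inl (PySem.Chars.find_spec h0).1))
        simp [hno] at this
      have h3 : ¬ 0 ≤ PySem.Chars.find L closedTok := by
        intro h0
        have := (tokAt_iff _).2 (Or.inr (Or.inr (PySem.Chars.find_spec h0).1))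
        simp [hno] at this
      simp [strip_wall_cell_suffix, strip_wall_cell_suffix_alt, hft, ← hL, h1, h2, h3,
        PySem.List.min?]
  | some i =>
      obtain ⟨hi, hmin⟩ := findTok_some_spec L i hft
      have hne : name.toList ≠ [] := by
        intro h0
        have hLnil : L = [] := by rw [hL, h0]; rfl
        rw [hLnil] at hft
        simp [findTok] at hft
      have hc : (i : Int) ≤ PySem.Chars.find L cellTok ∨ PySem.Chars.find L cellTok < 0 := by
        rcases lt_or_ge (PySem.Chars.find L cellTok) 0 with h | h0
        · exact Or.inr h
        · left
          have htk := (tokAt_iff _).2 (Or.inl (PySem.Chars.find_spec h0).1)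
          by_contra hlt
          have hj : (PySem.Chars.find L cellTok).toNat < i := by omega
          simp [hmin _ hj] at htk
      have hw : (i : Int) ≤ PySem.Chars.find L wallTok ∨ PySem.Chars.find L wallTok < 0 := by
        rcases lt_or_ge (PySem.Chars.find L wallTok) 0 with h | h0
        · exact Or.inr h
        · left
          have htk := (tokAt_iff _).2 (Or.inr (Or.inl (PySem.Chars.find_spec h0).1))
          by_contra hlt
          have hj : (PySem.Chars.find L wallTok).toNat < i := by omega
          simp [hmin _ hj] at htk
      have hcl : (i : Int) ≤ PySem.Chars.find L closedTok ∨ PySem.Chars.find L closedTok < 0 := by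
        rcases lt_or_ge (PySem.Chars.find L closedTok) 0 with h | h0
        · exact Or.inr h
        · left
          have htk := (tokAt_iff _).2 (Or.inr (Or.inr (PySem.Chars.find_spec h0).1))
          by_contra hlt
          have hj : (PySem.Chars.find L closedTok).toNat < i := by omega
          simp [hmin _ hj] at htk
      have hex : PySem.Chars.find L cellTok = (i : Int) ∨ PySem.Chars.find L wallTok = (i : Int) ∨
          PySem.Chars.find L closedTok = (i : Int) := by
        rcases (tokAt_iff _).1 hi with h | h | h
        · obtain ⟨h0, hle⟩ := prefix_drop_find L cellTok i h
          exact Or.inl (by omega)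
        · obtain ⟨h0, hle⟩ := prefix_drop_find L wallTok i h
          exact Or.inr (Or.inl (by omega))
        · obtain ⟨h0, hle⟩ := prefix_drop_find L closedTok i h
          exact Or.inr (Or.inr (by omega))
      have hm : PySem.List.min?
          (([PySem.Chars.find L cellTok, PySem.Chars.find L wallTok,
             PySem.Chars.find L closedTok]).filter (fun x => decide (0 ≤ x))) id
          = some ((i : Int)) := by
        rcases hex with hx | hx | hx <;>
        rcases hc with hc | hc <;> rcases hw with hw | hw <;> rcases hcl with hcl | hcl <;>
        by_cases p1 : 0 ≤ PySem.Chars.find L cellTok <;>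
          by_cases p2 : 0 ≤ PySem.Chars.find L wallTok <;>
            by_cases p3 : 0 ≤ PySem.Chars.find L closedTok <;>
              simp only [List.filter, p1, p2, p3, decide_true, decide_false,
                PySem.List.min?, List.foldl, id_eq, Option.some.injEq, reduceCtorEq] <;>
              (try split_ifs) <;> (try simp) <;> (try split_ifs) <;> (try simp) <;> omega
      simp [strip_wall_cell_suffix, strip_wall_cell_suffix_alt, hft, ← hL, hne, hm]

-- ===== VERDICT (by name: the statement is the Claim_ definition above) =====
theorem strip_wall_cell_suffix_spec : Claim_equal_strip_wall_cell_suffix := by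
  intro name _
  unfold Spec_strip_wall_cell_suffix
  exact ports_agree name
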